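-- pv_equiv track=rewrite | github.com/binlecode/co-cli | co_cli/memory/summary.py | _best_window_start
-- ===== SOURCE A (Python) =====
-- def _best_window_start(match_positions: list[int], text_len: int, max_chars: int) -> int:
--     """Find the window start that covers the most match positions."""
--     best_start = 0
--     best_count = 0
--     for candidate in match_positions:
--         ws = max(0, candidate - max_chars // 4)  # bias: 25% before, 75% after
--         we = ws + max_chars
--         if we > text_len:
--             ws = max(0, text_len - max_chars)
--         count = sum(1 for p in match_positions if ws <= p < ws + max_chars)
--         if count > best_count:
--             best_count = count
--             best_start = ws
--     return best_start
-- ===== SOURCE B (Python) =====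
-- def _count_less(s, x):
--     """Number of elements of sorted list s that are < x (hand-written bisect_left)."""
--     lo, hi = 0, len(s)
--     while lo < hi:
--         m = (lo + hi) // 2
--         if s[m] < x:
--             lo = m + 1
--         else:
--             hi = m
--     return lo
--
--
-- def _best_window_start(match_positions: list[int], text_len: int, max_chars: int) -> int:
--     """Find the window start that covers the most match positions."""
--     s = sorted(match_positions)
--     tail = max(0, text_len - max_chars)
--     q = max_chars // 4
--     best_start = 0
--     best_count = 0
--     for candidate in match_positions:
--         ws = candidate - q
--         if ws < 0:
--             ws = 0
--         if ws + max_chars > text_len: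
--             ws = tail
--         count = _count_less(s, ws + max_chars) - _count_less(s, ws)
--         if count > best_count:
--             best_count = count
--             best_start = ws
--     return best_start
-- ===== Notes on version B (the rewrite author's own statement) =====
-- stated objective: faster
-- what changed: Replaces the O(n) linear count inside the candidate loop with a single sort plus two hand-written binary searches (bisect_left) per candidate.
import Mathlib
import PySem

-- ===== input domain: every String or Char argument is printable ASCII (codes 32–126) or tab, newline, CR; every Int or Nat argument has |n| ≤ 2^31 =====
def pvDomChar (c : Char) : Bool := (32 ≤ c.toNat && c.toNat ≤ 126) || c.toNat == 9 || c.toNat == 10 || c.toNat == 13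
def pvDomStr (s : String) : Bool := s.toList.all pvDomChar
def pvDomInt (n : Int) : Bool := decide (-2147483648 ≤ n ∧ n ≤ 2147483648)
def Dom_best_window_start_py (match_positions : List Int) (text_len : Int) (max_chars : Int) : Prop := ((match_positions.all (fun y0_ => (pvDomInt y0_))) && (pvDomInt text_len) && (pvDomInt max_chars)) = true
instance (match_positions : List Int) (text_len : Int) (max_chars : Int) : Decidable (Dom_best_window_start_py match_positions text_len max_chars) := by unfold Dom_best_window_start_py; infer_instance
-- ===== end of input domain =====

-- B sorts the positions once and counts matches in each candidate window with two
-- hand-written binary searches instead of A's inner linear scan (faster: O(n log n) vs O(n^2)).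


-- ===== PORT A =====
def best_window_start_py (match_positions : List Int) (text_len : Int) (max_chars : Int) : Int :=
  (match_positions.foldl (fun (st : Int × Int) candidate =>
      let ws := max 0 (candidate - PySem.Int.floordiv max_chars 4)
      let we := ws + max_chars
      let ws := if we > text_len then max 0 (text_len - max_chars) else ws
      let count := match_positions.foldl
        (fun (a : Int) p => if ws ≤ p ∧ p < ws + max_chars then a + 1 else a) 0
      if count > st.2 then (ws, count) else st)
    (0, 0)).1

-- ===== PORT B =====
-- hand-written bisect_left loop of Source B: number of elements of sorted s that are < x
def countLessGo (s : List Int) (x : Int) (lo hi : Nat) : Nat :=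
  if h : lo < hi then
    let m := (lo + hi) / 2
    if s.getD m 0 < x then countLessGo s x (m + 1) hi else countLessGo s x lo m
  else lo
termination_by hi - lo
decreasing_by all_goals omega

def countLess (s : List Int) (x : Int) : Nat := countLessGo s x 0 s.length

def best_window_start_py_alt (match_positions : List Int) (text_len : Int) (max_chars : Int) : Int :=
  let s := PySem.List.sorted match_positions (fun x => x) false
  let tail := max 0 (text_len - max_chars)
  let q := PySem.Int.floordiv max_chars 4
  (match_positions.foldl (fun (st : Int × Int) candidate =>
      let ws0 := candidate - q
      let ws1 := if ws0 < 0 then 0 else ws0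
      let ws := if ws1 + max_chars > text_len then tail else ws1
      let count := (countLess s (ws + max_chars) : Int) - (countLess s ws : Int)
      if count > st.2 then (ws, count) else st)
    (0, 0)).1

-- ===== PRECONDITION & SPEC =====
def Spec_best_window_start_py (match_positions : List Int) (text_len : Int) (max_chars : Int) (out : Int) : Prop := out = best_window_start_py_alt match_positions text_len max_chars
instance (match_positions : List Int) (text_len : Int) (max_chars : Int) (out : Int) : Decidable (Spec_best_window_start_py match_positions text_len max_chars out) := by unfold Spec_best_window_start_py; infer_instance

-- ===== CLAIM (what is proved, stated in full; the proofs are below) =====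
def Claim_equal_best_window_start_py : Prop := ∀ (match_positions : List Int) (text_len : Int) (max_chars : Int), Dom_best_window_start_py match_positions text_len max_chars → Spec_best_window_start_py match_positions text_len max_chars (best_window_start_py match_positions text_len max_chars)

-- ===== LEMMAS AND PROOFS =====

-- the binary-search loop computes the number of elements < x in a sorted list
theorem countLessGo_spec (s : List Int) (x : Int) (lo hi : Nat)
    (hs : s.Pairwise (· ≤ ·))
    (hhi : hi ≤ s.length) (hle : lo ≤ hi)
    (hlo : ∀ i (h : i < s.length), i < lo → s[i] < x)
    (hhi2 : ∀ i (h : i < s.length), hi ≤ i → ¬ s[i] < x) :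
    countLessGo s x lo hi = s.countP (fun p => decide (p < x)) := by
  induction lo, hi using countLessGo.induct s x with
  | case1 lo hi h m hm ih =>
    rw [countLessGo]
    simp only [h, dif_pos]
    rw [if_pos (by simpa [m] using hm)]
    apply ih hhi (by omega)
    · intro i hi' hilt
      rcases Nat.lt_or_ge i lo with h1 | h1
      · exact hlo i hi' h1
      · have hm' : m < s.length := by omega
        have : s[i] ≤ s[m] := by
          rcases Nat.lt_or_eq_of_le (by omega : i ≤ m) with h2 | h2
          · exact (List.pairwise_iff_getElem.mp hs) i m hi' hm' h2
          · simp [h2]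
        have : s[m] = s.getD m 0 := by simp [List.getD_eq_getElem?_getD, hm']
        omega
    · exact hhi2
  | case2 lo hi h m hm ih =>
    rw [countLessGo]
    simp only [h, dif_pos]
    rw [if_neg (by simpa [m] using hm)]
    apply ih (by omega) (by omega) hlo
    intro i hi' hmi
    have hm' : m < s.length := by omega
    have h1 : s[m] ≤ s[i] := by
      rcases Nat.lt_or_eq_of_le hmi with h2 | h2
      · exact (List.pairwise_iff_getElem.mp hs) m i hm' hi' h2
      · simp [h2]
    have : s[m] = s.getD m 0 := by simp [List.getD_eq_getElem?_getD, hm']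
    omega
  | case3 lo hi h =>
    rw [countLessGo, dif_neg h]
    have hlh : lo = hi := by omega
    subst hlh
    have h1 : (s.take lo).countP (fun p => decide (p < x)) = lo := by
      rw [List.countP_eq_length.mpr, List.length_take_of_le hhi]
      intro a ha
      rw [List.mem_take_iff_getElem] at ha
      obtain ⟨i, hilt, rfl⟩ := ha
      have := hlo i (by omega) (by omega)
      simpa using this
    have h2 : (s.drop lo).countP (fun p => decide (p < x)) = 0 := by
      rw [List.countP_eq_zero]
      intro a ha
      rw [List.mem_drop_iff_getElem] at ha
      obtain ⟨i, hilt, rfl⟩ := ha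
      have := hhi2 (lo + i) (by omega) (by omega)
      simpa using this
    have hcp : s.countP (fun p => decide (p < x)) = lo := by
      conv_lhs => rw [← List.take_append_drop lo s]
      rw [List.countP_append, h1, h2]; omega
    exact hcp.symm

theorem countLess_spec (s : List Int) (x : Int) (hs : s.Pairwise (· ≤ ·)) :
    countLess s x = s.countP (fun p => decide (p < x)) := by
  apply countLessGo_spec s x 0 s.length hs le_rfl (Nat.zero_le _)
  · intro i _ h; omega
  · intro i h h2; omega

theorem foldl_count_eq_gen (l : List Int) (q : Int → Prop) [DecidablePred q] (a : Int) :
    l.foldl (fun (a : Int) p => if q p then a + 1 else a) a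
      = a + (l.countP (fun p => decide (q p)) : Int) := by
  induction l generalizing a with
  | nil => simp
  | cons x t ih =>
    simp only [List.foldl_cons, List.countP_cons]
    rw [ih]
    by_cases h : q x
    · simp [h]; ring
    · simp [h]

theorem countP_split (l : List Int) (ws we : Int) (h : ws ≤ we) :
    l.countP (fun p => decide (p < we))
      = l.countP (fun p => decide (p < ws)) + l.countP (fun p => decide (ws ≤ p ∧ p < we)) := by
  induction l with
  | nil => simp
  | cons x t ih =>
    simp only [List.countP_cons, Bool.decide_and] at ih ⊢
    rw [ih]
    split_ifs <;> simp_all <;> omega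

theorem countP_mono_lt (l : List Int) (a b : Int) (h : a ≤ b) :
    l.countP (fun p => decide (p < a)) ≤ l.countP (fun p => decide (p < b)) := by
  apply List.countP_mono_left
  intro x _ hx
  simp at hx ⊢; omega

-- both per-candidate step functions agree and keep the best count nonnegative
theorem fold_eq (mp : List Int) (tl mc : Int) (cs : List Int) (st : Int × Int) (h : 0 ≤ st.2) :
    (cs.foldl (fun (st : Int × Int) candidate =>
        let ws := max 0 (candidate - PySem.Int.floordiv mc 4)
        let we := ws + mc
        let ws := if we > tl then max 0 (tl - mc) else ws
        let count := mp.foldl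
          (fun (a : Int) p => if ws ≤ p ∧ p < ws + mc then a + 1 else a) 0
        if count > st.2 then (ws, count) else st) st)
      = (cs.foldl (fun (st : Int × Int) candidate =>
        let ws0 := candidate - PySem.Int.floordiv mc 4
        let ws1 := if ws0 < 0 then 0 else ws0
        let ws := if ws1 + mc > tl then max 0 (tl - mc) else ws1
        let count := (countLess (PySem.List.sorted mp (fun x => x) false) (ws + mc) : Int)
          - (countLess (PySem.List.sorted mp (fun x => x) false) ws : Int)
        if count > st.2 then (ws, count) else st) st)
      ∧ 0 ≤ (cs.foldl (fun (st : Int × Int) candidate =>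
        let ws := max 0 (candidate - PySem.Int.floordiv mc 4)
        let we := ws + mc
        let ws := if we > tl then max 0 (tl - mc) else ws
        let count := mp.foldl
          (fun (a : Int) p => if ws ≤ p ∧ p < ws + mc then a + 1 else a) 0
        if count > st.2 then (ws, count) else st) st).2 := by
  induction cs generalizing st with
  | nil => exact ⟨rfl, h⟩
  | cons c t ih =>
    simp only [List.foldl_cons]
    set s := PySem.List.sorted mp (fun x => x) false with hsdef
    have hs : s.Pairwise (· ≤ ·) := PySem.List.sorted_pairwise mp (fun x => x)
    have hperm : s.Perm mp := PySem.List.sorted_perm mp (fun x => x) false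
    have hcl : ∀ y, (countLess s y : Int) = (mp.countP (fun p => decide (p < y)) : Int) := by
      intro y
      rw [countLess_spec s y hs, hperm.countP_eq]
    -- ws agreement
    have hws1 : (if c - PySem.Int.floordiv mc 4 < 0 then (0:Int) else c - PySem.Int.floordiv mc 4)
        = max 0 (c - PySem.Int.floordiv mc 4) := by split_ifs <;> omega
    rw [hws1]
    set ws0 := max 0 (c - PySem.Int.floordiv mc 4) with hws0
    set ws := if ws0 + mc > tl then max 0 (tl - mc) else ws0 with hws
    -- count agreement
    have hA : mp.foldl (fun (a : Int) p => if ws ≤ p ∧ p < ws + mc then a + 1 else a) 0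
        = (mp.countP (fun p => decide (ws ≤ p ∧ p < ws + mc)) : Int) := by
      rw [foldl_count_eq_gen]; ring
    by_cases hmc : 0 ≤ mc
    · have hsp := countP_split mp ws (ws + mc) (by omega)
      have hcount : (countLess s (ws + mc) : Int) - (countLess s ws : Int)
          = mp.foldl (fun (a : Int) p => if ws ≤ p ∧ p < ws + mc then a + 1 else a) 0 := by
        rw [hcl, hcl, hA]
        omega
      rw [hcount]
      apply ih
      have hAnn : 0 ≤ mp.foldl (fun (a : Int) p => if ws ≤ p ∧ p < ws + mc then a + 1 else a) 0 := by
        rw [hA]; positivity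
      split_ifs with hgt
      · simpa using hAnn
      · exact h
    · replace hmc : mc < 0 := by omega
      -- empty window: A counts 0, B's difference is ≤ 0; neither updates
      have hA0 : mp.foldl (fun (a : Int) p => if ws ≤ p ∧ p < ws + mc then a + 1 else a) 0 = 0 := by
        rw [hA]
        have h0 : mp.countP (fun p => decide (ws ≤ p ∧ p < ws + mc)) = 0 := by
          rw [List.countP_eq_zero]
          intro a _
          simp only [decide_eq_true_eq, not_and, not_lt]
          omega
        rw [h0]; simp
      have hB0 : (countLess s (ws + mc) : Int) - (countLess s ws : Int) ≤ 0 := by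
        rw [hcl, hcl]
        have := countP_mono_lt mp (ws + mc) ws (by omega)
        omega
      rw [hA0]
      rw [if_neg (by omega), if_neg (by omega)]
      exact ih st h

-- ===== VERDICT (by name: the statement is the Claim_ definition above) =====
theorem best_window_start_py_spec : Claim_equal_best_window_start_py := by
  intro mp tl mc _dom
  unfold Spec_best_window_start_py best_window_start_py best_window_start_py_alt
  have := fold_eq mp tl mc mp ((0:Int), (0:Int)) (by norm_num)
  rw [this.1]
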